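-- pv_equiv track=rewrite | github.com/syurskyi/Algorithms_and_Data_Structure | _algorithms_challenges/projecteuler/ProjectEuler-master(2)/ProjectEuler-master/386.py | __search
-- ===== SOURCE A (Python) =====
-- def __search(signature, k):
--     count = 0
--     signature_len = len(signature)
--     dfs_stack = []
--     for i in range(signature[0] + 1):
--         dfs_stack.append(([i], 1, i))
--     while dfs_stack:
--         top_vector, top_dim, top_sum = dfs_stack.pop(-1)
--         if top_sum > k:
--             continue
--         if top_dim == signature_len:
--             if top_sum == k:
--                 count += 1
--             continue
--         for i in range(signature[top_dim] + 1):
--             next_vector = top_vector + [i]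
--             next_dim = top_dim + 1
--             next_sum = top_sum + i
--             dfs_stack.append((next_vector, next_dim, next_sum))
--     return count
-- ===== SOURCE B (Python) =====
-- def __search(signature, k):
--     # DP over dimensions: dp[j] = number of bounded vectors over the processed
--     # prefix whose components sum to j; bounded-window convolution per dimension.
--     total = 0
--     for s in signature:
--         total += max(s, 0)
--     if k < 0 or k > total:
--         return 0
--     dp = [1] + [0] * k
--     for s in signature:
--         if s < 0:
--             return 0
--         dp = [sum(dp[max(0, j - s):j + 1]) for j in range(k + 1)]
--     return dp[k]
-- ===== Notes on version B (the rewrite author's own statement) =====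
-- stated objective: alternative
-- what changed: A enumerates every bounded vector with an explicit DFS stack and counts those summing to k; B runs a dynamic program over the dimensions keeping, for each sum 0..k, the number of prefix vectors reaching it (windowed-sum update per dimension), with an upfront 0 answer when k is negative or exceeds the sum of the bounds.
-- crash fix: On the empty signature A raises IndexError (signature[0]); B returns the exact count for zero dimensions, 1 if k == 0 else 0. — e.g. on __search([], 0): A raises IndexError, B returns 1
import Mathlib
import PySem

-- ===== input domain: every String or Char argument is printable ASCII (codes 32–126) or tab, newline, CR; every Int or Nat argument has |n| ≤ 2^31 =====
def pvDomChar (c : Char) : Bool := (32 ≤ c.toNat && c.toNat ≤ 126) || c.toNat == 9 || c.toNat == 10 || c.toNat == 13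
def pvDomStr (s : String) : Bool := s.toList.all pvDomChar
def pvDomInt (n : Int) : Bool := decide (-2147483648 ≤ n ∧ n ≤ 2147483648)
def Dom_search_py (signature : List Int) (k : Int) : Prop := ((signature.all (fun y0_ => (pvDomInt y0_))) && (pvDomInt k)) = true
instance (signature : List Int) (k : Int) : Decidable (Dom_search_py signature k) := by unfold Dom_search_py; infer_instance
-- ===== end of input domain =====

-- B counts by a DP over the dimensions (dp[j] = number of vectors of the processed prefix
-- summing to j, windowed-sum update) instead of A's explicit-stack DFS over all vectors.

-- ===== PORT A =====
-- the children pushed for one popped stack entry (the inner 'for i in range(signature[top_dim]+1)')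
def aChildren (sig : List Int) (vec : List Int) (dim : Int) (sum : Int) :
    List (List Int × Int × Int) :=
  (PySem.List.pyRange 0 (PySem.List.pyGetD sig dim 0 + 1) 1).map
    (fun i => (vec ++ [i], dim + 1, sum + i))

-- termination helpers for the 'while dfs_stack:' loop: weight of a subtree of the DFS tree
def treeW : List Int → Nat
  | [] => 1
  | s :: r => 1 + (s + 1).toNat * treeW r

def entryW (sig : List Int) (e : List Int × Int × Int) : Nat := treeW (sig.drop e.2.1.toNat)

def stackW (sig : List Int) (st : List (List Int × Int × Int)) : Nat :=
  (st.map (entryW sig)).sum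

-- invariant of the reachable stacks (dims stay in range); carried as a proof argument for termination
def aInv (sig : List Int) (st : List (List Int × Int × Int)) : Prop :=
  ∀ e ∈ st, 0 ≤ e.2.1 ∧ e.2.1 ≤ (sig.length : Int)

theorem treeW_pos (l : List Int) : 0 < treeW l := by
  cases l <;> simp [treeW]

theorem stackW_append (sig : List Int) (s t : List (List Int × Int × Int)) :
    stackW sig (s ++ t) = stackW sig s + stackW sig t := by
  simp [stackW]

-- the 'while dfs_stack:' loop (pop from the end; push children appended at the end)
def aLoop (sig : List Int) (k : Int) (st : List (List Int × Int × Int)) (count : Int)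
    (hinv : aInv sig st) : Int :=
  match hst : st.getLast? with
  | none => count
  | some e =>
    have hmem : e ∈ st := List.mem_of_getLast? hst
    have hst' : st = st.dropLast ++ [e] := (List.dropLast_append_getLast? e hst).symm
    have hinv' : aInv sig st.dropLast := fun x hx => hinv x (List.dropLast_sublist st |>.mem hx)
    if e.2.2 > k then
      aLoop sig k st.dropLast count hinv'
    else if hdim : e.2.1 = (sig.length : Int) then
      aLoop sig k st.dropLast (if e.2.2 = k then count + 1 else count) hinv'
    else
      aLoop sig k (st.dropLast ++ aChildren sig e.1 e.2.1 e.2.2) count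
        (by
          intro x hx
          rcases List.mem_append.mp hx with h | h
          · exact hinv' x h
          · obtain ⟨i, _, rfl⟩ := List.mem_map.mp h
            have h1 := (hinv e hmem).1
            have h2 := (hinv e hmem).2
            dsimp only
            omega)
  termination_by stackW sig st
  decreasing_by
  all_goals
    have hkey : stackW sig st = stackW sig st.dropLast + entryW sig e := by
      conv_lhs => rw [hst']
      rw [stackW_append]; simp [stackW]
    have hpos : 0 < entryW sig e := treeW_pos _
  · omega
  · omega
  · rw [stackW_append, hkey]
    have h1 := (hinv e hmem).1
    have h2 := (hinv e hmem).2
    have hlt : e.2.1.toNat < sig.length := by omega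
    have hdrop : sig.drop e.2.1.toNat = sig[e.2.1.toNat] :: sig.drop (e.2.1.toNat + 1) :=
      List.drop_eq_getElem_cons hlt
    have hget : PySem.List.pyGetD sig e.2.1 0 = sig[e.2.1.toNat] :=
      PySem.List.pyGetD_eq_getElem sig 0 h1 (by omega)
    have hsucc : (e.2.1 + 1).toNat = e.2.1.toNat + 1 := by omega
    have hme : entryW sig e = 1 + (sig[e.2.1.toNat] + 1).toNat * treeW (sig.drop (e.2.1.toNat + 1)) := by
      show treeW (sig.drop e.2.1.toNat) = _
      rw [hdrop]; rfl
    have hchild : stackW sig (aChildren sig e.1 e.2.1 e.2.2)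
        = (sig[e.2.1.toNat] + 1).toNat * treeW (sig.drop (e.2.1.toNat + 1)) := by
      show ((List.map (fun i => (e.1 ++ [i], e.2.1 + 1, e.2.2 + i))
          (PySem.List.pyRange 0 (PySem.List.pyGetD sig e.2.1 0 + 1) 1)).map (entryW sig)).sum = _
      rw [List.map_map]
      have hc : (entryW sig ∘ fun i => (e.1 ++ [i], e.2.1 + 1, e.2.2 + i))
          = fun (_ : Int) => treeW (sig.drop (e.2.1 + 1).toNat) := funext fun _ => rfl
      rw [hc]
      rw [List.map_const', List.sum_replicate, smul_eq_mul,
        PySem.List.length_pyRange_one, hget, hsucc]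
      simp
    rw [hchild]
    omega

def search_py (signature : List Int) (k : Int) : Int :=
  if hsig : signature = [] then 0  -- Python raises IndexError here (signature[0]); excluded by Pre_
  else
    aLoop signature k
      ((PySem.List.pyRange 0 (PySem.List.pyGetD signature 0 0 + 1) 1).map (fun i => ([i], 1, i)))
      0
      (by
        intro x hx
        obtain ⟨i, _, rfl⟩ := List.mem_map.mp hx
        have : 0 < signature.length := List.length_pos_iff.mpr hsig
        constructor <;> simp <;> omega)

-- ===== PORT B =====
-- one DP update: dp = [sum(dp[max(0, j-s) : j+1]) for j in range(k+1)]
def bStep (k : Int) (dp : List Int) (s : Int) : List Int :=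
  (PySem.List.pyRange 0 (k + 1) 1).map
    (fun j => (PySem.List.slice dp (some (max 0 (j - s))) (some (j + 1))).sum)

-- 'for s in signature: …' with the early 'return 0' on a negative bound, then 'return dp[k]'
def bLoop (k : Int) : List Int → List Int → Int
  | [], dp => PySem.List.pyGetD dp k 0
  | s :: rest, dp => if s < 0 then 0 else bLoop k rest (bStep k dp s)

def search_py_alt (signature : List Int) (k : Int) : Int :=
  let total := signature.foldl (fun acc s => acc + max s 0) 0
  if k < 0 ∨ k > total then 0
  else bLoop k signature (1 :: List.replicate k.toNat 0)

-- ===== PRECONDITION & SPEC =====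
-- Pre_ excludes only the empty signature, on which A raises IndexError (signature[0]).
def Pre_search_py (signature : List Int) (k : Int) : Prop := signature ≠ []
instance (signature : List Int) (k : Int) : Decidable (Pre_search_py signature k) := by
  unfold Pre_search_py; infer_instance

def pvWitness_search_py : List Int × Int := ([2, 1], 2)

-- A raises IndexError exactly on the empty signature; B returns the mathematically right count
-- there (1 if k == 0 else 0: the empty vector).
def Raises_search_py (signature : List Int) (k : Int) : Prop := signature = []
instance (signature : List Int) (k : Int) : Decidable (Raises_search_py signature k) := by
  unfold Raises_search_py; infer_instance
def pvRaiseWitness_search_py : List Int × Int := ([], 0)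
def pvRaiseWitnessOut_search_py : Int := 1

def Spec_search_py (signature : List Int) (k : Int) (out : Int) : Prop :=
  out = search_py_alt signature k
instance (signature : List Int) (k : Int) (out : Int) : Decidable (Spec_search_py signature k out) := by
  unfold Spec_search_py; infer_instance

-- ===== CLAIM (what is proved, stated in full; the proofs are below) =====
def Claim_equal_search_py : Prop := ∀ (signature : List Int) (k : Int),
  Dom_search_py signature k → Pre_search_py signature k →
    Spec_search_py signature k (search_py signature k)

def Claim_raises_search_py : Prop :=
  (∀ (signature : List Int) (k : Int), Dom_search_py signature k →
      Raises_search_py signature k → ¬ Pre_search_py signature k) ∧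
  (Dom_search_py (pvRaiseWitness_search_py.1) (pvRaiseWitness_search_py.2) ∧
   Raises_search_py (pvRaiseWitness_search_py.1) (pvRaiseWitness_search_py.2) ∧
   search_py_alt (pvRaiseWitness_search_py.1) (pvRaiseWitness_search_py.2) = pvRaiseWitnessOut_search_py)

-- ===== LEMMAS AND PROOFS =====

-- the mathematical count: number of vectors v with 0 ≤ v i ≤ l i and component sum t
theorem sum_Ico_glue (f : Int → Int) (a b c : Int) (h1 : a ≤ b) (h2 : b ≤ c) :
    ((∑ i ∈ Finset.Ico a b, f i) + ∑ i ∈ Finset.Ico b c, f i) = ∑ i ∈ Finset.Ico a c, f i := by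
  rw [← Finset.sum_union (Finset.Ico_disjoint_Ico_consecutive a b c),
    Finset.Ico_union_Ico_eq_Ico h1 h2]

def cnt : List Int → Int → Int
  | [], t => if t = 0 then 1 else 0
  | s :: r, t => ((PySem.List.pyRange 0 (s + 1) 1).map (fun i => cnt r (t - i))).sum

theorem sum_pyRange_aux (f : Int → Int) (a : Int) (N : Nat) :
    ((PySem.List.pyRange a (a + (N : Int)) 1).map f).sum = ∑ m ∈ Finset.Ico a (a + (N : Int)), f m := by
  induction N with
  | zero => simp [PySem.List.pyRange_one_eq_nil]
  | succ n ih =>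
    have hsplit : (a + ((n + 1 : Nat) : Int)) = (a + (n : Int)) + 1 := by push_cast; ring
    rw [hsplit, PySem.List.pyRange_one_succ_right (by omega),
      ← sum_Ico_glue f a (a + (n : Int)) (a + (n : Int) + 1) (by omega) (by omega)]
    have hone : Finset.Ico (a + (n : Int)) (a + (n : Int) + 1) = {a + (n : Int)} := by
      ext x; simp [Finset.mem_Ico]; omega
    simp only [List.map_append, List.sum_append, List.map_cons, List.map_nil, List.sum_cons,
      List.sum_nil]
    rw [ih, hone, Finset.sum_singleton]
    ring

theorem sum_pyRange (f : Int → Int) (a b : Int) :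
    ((PySem.List.pyRange a b 1).map f).sum = ∑ m ∈ Finset.Ico a b, f m := by
  by_cases h : b ≤ a
  · rw [PySem.List.pyRange_one_eq_nil h, Finset.Ico_eq_empty (by omega)]; simp
  · have hn : b = a + ((b - a).toNat : Int) := by omega
    rw [hn]
    exact sum_pyRange_aux f a (b - a).toNat

theorem cnt_neg (l : List Int) (t : Int) (h : t < 0) : cnt l t = 0 := by
  induction l generalizing t with
  | nil => simp [cnt]; omega
  | cons s r ih =>
    rw [cnt]
    apply List.sum_eq_zero
    intro x hx
    obtain ⟨i, hi, rfl⟩ := List.mem_map.mp hx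
    have := (PySem.List.mem_pyRange_one.mp hi).1
    exact ih _ (by omega)

theorem cnt_cons (s : Int) (r : List Int) (t : Int) :
    cnt (s :: r) t = ∑ i ∈ Finset.Ico 0 (s + 1), cnt r (t - i) := by
  rw [cnt, sum_pyRange]

theorem cnt_append_singleton (l : List Int) (s t : Int) :
    cnt (l ++ [s]) t = ∑ i ∈ Finset.Ico 0 (s + 1), cnt l (t - i) := by
  induction l generalizing t with
  | nil => rw [List.nil_append, cnt_cons]
  | cons a l ih =>
    rw [List.cons_append, cnt_cons]
    have : ∀ j ∈ Finset.Ico 0 (a + 1), cnt (l ++ [s]) (t - j)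
        = ∑ i ∈ Finset.Ico 0 (s + 1), cnt l (t - j - i) := fun j _ => ih (t - j)
    rw [Finset.sum_congr rfl this, Finset.sum_comm]
    apply Finset.sum_congr rfl
    intro i _
    rw [cnt_cons]
    apply Finset.sum_congr rfl
    intro j _
    congr 1
    ring

theorem cnt_neg_mem (l : List Int) (t : Int) (h : ∃ s ∈ l, s < 0) : cnt l t = 0 := by
  induction l generalizing t with
  | nil => simp at h
  | cons a l ih =>
    obtain ⟨s, hs, hneg⟩ := h
    rcases List.mem_cons.mp hs with rfl | hmem
    · rw [cnt, PySem.List.pyRange_one_eq_nil (by omega)]; rfl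
    · rw [cnt]
      apply List.sum_eq_zero
      intro x hx
      obtain ⟨i, _, rfl⟩ := List.mem_map.mp hx
      exact ih _ ⟨s, hmem, hneg⟩

theorem cnt_gt_total (l : List Int) (t : Int)
    (h : (l.map (fun s => max s 0)).sum < t) : cnt l t = 0 := by
  induction l generalizing t with
  | nil => simp at h; simp [cnt]; omega
  | cons a l ih =>
    rw [cnt]
    apply List.sum_eq_zero
    intro x hx
    obtain ⟨i, hi, rfl⟩ := List.mem_map.mp hx
    have h1 := (PySem.List.mem_pyRange_one.mp hi).1
    have h2 := (PySem.List.mem_pyRange_one.mp hi).2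
    simp only [List.map_cons, List.sum_cons] at h
    exact ih _ (by omega)

theorem cnt_window (l : List Int) (s j : Int) (hs : 0 ≤ s) (hj : 0 ≤ j) :
    cnt (l ++ [s]) j = ∑ m ∈ Finset.Ico (max 0 (j - s)) (j + 1), cnt l m := by
  rw [cnt_append_singleton]
  have hbij : ∑ i ∈ Finset.Ico 0 (s + 1), cnt l (j - i)
      = ∑ m ∈ Finset.Ico (j - s) (j + 1), cnt l m := by
    apply Finset.sum_nbij' (fun i => j - i) (fun m => j - m)
    · intro i hi; simp only [Finset.mem_Ico] at *; omega
    · intro m hm; simp only [Finset.mem_Ico] at *; omega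
    · intro i _; omega
    · intro m _; omega
    · intro i _; rfl
  rw [hbij]
  by_cases h : 0 ≤ j - s
  · rw [max_eq_right h]
  · have hmax : max 0 (j - s) = 0 := by omega
    rw [hmax, ← sum_Ico_glue (fun m => cnt l m) (j - s) 0 (j + 1) (by omega) (by omega)]
    have hz : ∑ m ∈ Finset.Ico (j - s) (0 : Int), cnt l m = 0 :=
      Finset.sum_eq_zero (fun m hm => cnt_neg l m (by simp only [Finset.mem_Ico] at hm; omega))
    rw [hz, zero_add]

theorem pyRange_drop (m : Nat) : ∀ (a b : Int),
    (PySem.List.pyRange a b 1).drop m = PySem.List.pyRange (a + (m : Int)) b 1 := by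
  induction m with
  | zero => intro a b; simp
  | succ n ih =>
    intro a b
    by_cases hab : a < b
    · rw [PySem.List.pyRange_one_cons hab]
      show (PySem.List.pyRange (a + 1) b 1).drop n = _
      rw [ih]
      congr 1
      push_cast; ring
    · rw [PySem.List.pyRange_one_eq_nil (by omega), List.drop_nil,
        PySem.List.pyRange_one_eq_nil (by omega)]

theorem pyRange_take (m : Nat) : ∀ (a b : Int),
    (PySem.List.pyRange a b 1).take m = PySem.List.pyRange a (min b (a + (m : Int))) 1 := by
  induction m with
  | zero => intro a b; rw [List.take_zero, PySem.List.pyRange_one_eq_nil (by omega)]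
  | succ n ih =>
    intro a b
    by_cases hab : a < b
    · rw [PySem.List.pyRange_one_cons hab]
      show a :: (PySem.List.pyRange (a + 1) b 1).take n = _
      rw [ih, show min b (a + ((n + 1 : Nat) : Int)) = min b ((a + 1) + (n : Int)) by
        push_cast; omega, PySem.List.pyRange_one_cons (show a < min b ((a + 1) + (n : Int)) by omega)]
    · rw [PySem.List.pyRange_one_eq_nil (by omega), List.take_nil,
        PySem.List.pyRange_one_eq_nil (by omega)]

theorem slice_map_pyRange (f : Int → Int) (n lo hi : Int)
    (h0 : 0 ≤ lo) (h1 : lo ≤ hi) (h2 : hi ≤ n) :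
    PySem.List.slice ((PySem.List.pyRange 0 n 1).map f) (some lo) (some hi)
      = (PySem.List.pyRange lo hi 1).map f := by
  rw [PySem.List.slice_toNat _ h0 (by omega), ← List.map_drop, ← List.map_take,
    pyRange_drop, pyRange_take]
  congr 2
  all_goals omega

theorem init_dp (k : Int) (hk : 0 ≤ k) :
    (1 : Int) :: List.replicate k.toNat 0
      = (PySem.List.pyRange 0 (k + 1) 1).map (fun j => cnt [] j) := by
  rw [PySem.List.pyRange_one_cons (by omega), List.map_cons]
  have h0 : cnt [] (0 : Int) = 1 := by simp [cnt]
  rw [h0]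
  congr 1
  have hmem : ∀ x ∈ (PySem.List.pyRange (0 + 1) (k + 1) 1).map (fun j => cnt [] j),
      x = (0 : Int) := by
    intro x hx
    obtain ⟨j, hj, rfl⟩ := List.mem_map.mp hx
    have := (PySem.List.mem_pyRange_one.mp hj).1
    simp [cnt]; omega
  rw [List.eq_replicate_of_mem hmem]
  congr 1
  rw [List.length_map, PySem.List.length_pyRange_one]
  omega

theorem bStep_eq (p : List Int) (k s : Int) (hk : 0 ≤ k) (hs : 0 ≤ s) :
    bStep k ((PySem.List.pyRange 0 (k + 1) 1).map (fun j => cnt p j)) s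
      = (PySem.List.pyRange 0 (k + 1) 1).map (fun j => cnt (p ++ [s]) j) := by
  unfold bStep
  apply List.map_congr_left
  intro j hj
  have hj0 := (PySem.List.mem_pyRange_one.mp hj).1
  have hj1 := (PySem.List.mem_pyRange_one.mp hj).2
  rw [slice_map_pyRange _ (k + 1) _ _ (by omega) (by omega) (by omega),
    sum_pyRange, cnt_window p s j hs hj0]

theorem bLoop_eq (rest : List Int) : ∀ (p : List Int) (k : Int), 0 ≤ k →
    bLoop k rest ((PySem.List.pyRange 0 (k + 1) 1).map (fun j => cnt p j))
      = cnt (p ++ rest) k := by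
  induction rest with
  | nil =>
    intro p k hk
    show PySem.List.pyGetD _ k 0 = _
    rw [PySem.List.pyGetD_map_pyRange_of_nonneg _ (k + 1) k 0 hk (by omega)]
    simp
  | cons s rest ih =>
    intro p k hk
    show (if s < 0 then 0 else bLoop k rest (bStep k _ s)) = _
    by_cases hneg : s < 0
    · rw [if_pos hneg, cnt_neg_mem _ _ ⟨s, by simp, hneg⟩]
    · rw [if_neg hneg, bStep_eq p k s hk (by omega), ih (p ++ [s]) k hk]
      simp

theorem alt_eq_cnt (sig : List Int) (k : Int) : search_py_alt sig k = cnt sig k := by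
  unfold search_py_alt
  have htot : sig.foldl (fun acc s => acc + max s 0) 0 = 0 + (sig.map (fun s => max s 0)).sum :=
    PySem.List.foldl_add _ _ _
  by_cases h : k < 0 ∨ k > sig.foldl (fun acc s => acc + max s 0) 0
  · rw [if_pos h]
    rcases h with h | h
    · rw [cnt_neg sig k h]
    · rw [cnt_gt_total sig k (by omega)]
  · rw [if_neg h]
    push_neg at h
    rw [init_dp k h.1, bLoop_eq sig [] k h.1, List.nil_append]

theorem aLoop_eq (sig : List Int) (k : Int) (st0 : List (List Int × Int × Int)) (count0 : Int)
    (hinv0 : aInv sig st0) :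
    aLoop sig k st0 count0 hinv0
      = count0 + (st0.map (fun e => cnt (sig.drop e.2.1.toNat) (k - e.2.2))).sum := by
  fun_induction aLoop with
  | case1 st count hinv hst =>
    rw [List.getLast?_eq_none_iff.mp hst]
    simp
  | case2 st count hinv e hst hmem hst' hinv' hgt ih =>
    rw [ih]
    conv_rhs => rw [hst']
    rw [List.map_append, List.sum_append, List.map_cons, List.map_nil, List.sum_cons,
      List.sum_nil, cnt_neg _ _ (by omega)]
    ring
  | case3 st count hinv e hst hmem hst' hinv' hgt hdim ih =>
    have ih' : aLoop sig k st.dropLast (if e.2.2 = k then count + 1 else count) hinv'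
        = (if e.2.2 = k then count + 1 else count)
          + (st.dropLast.map (fun e => cnt (sig.drop e.2.1.toNat) (k - e.2.2))).sum := ih
    rw [ih']
    conv_rhs => rw [hst']
    rw [List.map_append, List.sum_append, List.map_cons, List.map_nil, List.sum_cons,
      List.sum_nil]
    have h1 := (hinv e hmem).1
    have htn : e.2.1.toNat = sig.length := by omega
    have hC : cnt (sig.drop e.2.1.toNat) (k - e.2.2) = if e.2.2 = k then 1 else 0 := by
      rw [htn, List.drop_length, cnt]
      by_cases h : e.2.2 = k
      · rw [if_pos (by omega), if_pos h]
      · rw [if_neg (by omega), if_neg h]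
    rw [hC]
    split_ifs <;> ring
  | case4 st count hinv e hst hmem hst' hinv' hgt hdim ih =>
    rw [ih]
    conv_rhs => rw [hst']
    rw [List.map_append, List.sum_append, List.map_append, List.sum_append,
      List.map_cons, List.map_nil, List.sum_cons, List.sum_nil]
    have h1 := (hinv e hmem).1
    have h2 := (hinv e hmem).2
    have hlt : e.2.1.toNat < sig.length := by omega
    have hsucc : (e.2.1 + 1).toNat = e.2.1.toNat + 1 := by omega
    have hget : PySem.List.pyGetD sig e.2.1 0 = sig[e.2.1.toNat] :=
      PySem.List.pyGetD_eq_getElem sig 0 h1 (by omega)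
    have hdrop : sig.drop e.2.1.toNat = sig[e.2.1.toNat] :: sig.drop (e.2.1.toNat + 1) :=
      List.drop_eq_getElem_cons hlt
    have hcomp : ((fun e' : List Int × Int × Int => cnt (sig.drop e'.2.1.toNat) (k - e'.2.2))
          ∘ (fun i => (e.1 ++ [i], e.2.1 + 1, e.2.2 + i)))
        = fun i => cnt (sig.drop (e.2.1.toNat + 1)) (k - e.2.2 - i) := by
      funext i
      show cnt (sig.drop (e.2.1 + 1).toNat) (k - (e.2.2 + i)) = _
      rw [hsucc]
      congr 1
      ring
    have hch : ((aChildren sig e.1 e.2.1 e.2.2).map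
          (fun e' => cnt (sig.drop e'.2.1.toNat) (k - e'.2.2))).sum
        = cnt (sig.drop e.2.1.toNat) (k - e.2.2) := by
      rw [aChildren, List.map_map, hcomp, hget, hdrop, cnt]
    rw [hch]
    ring

theorem a_eq_cnt (sig : List Int) (k : Int) (h : sig ≠ []) : search_py sig k = cnt sig k := by
  obtain ⟨s0, rest, rfl⟩ : ∃ a l, sig = a :: l := by
    cases sig with
    | nil => exact absurd rfl h
    | cons a l => exact ⟨a, l, rfl⟩
  unfold search_py
  rw [dif_neg h, aLoop_eq, List.map_map]
  have hcomp : ((fun e : List Int × Int × Int =>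
        cnt ((s0 :: rest).drop e.2.1.toNat) (k - e.2.2)) ∘ (fun i : Int => ([i], (1 : Int), i)))
      = fun i => cnt rest (k - i) := funext fun i => rfl
  rw [hcomp, PySem.List.pyGetD_zero_cons, zero_add, cnt]

-- ===== VERDICT (by name: the statement is the Claim_ definition above) =====
theorem search_py_spec : Claim_equal_search_py := by
  intro sig k _ hpre
  unfold Spec_search_py
  rw [a_eq_cnt sig k hpre, alt_eq_cnt]

@[simp] theorem search_py_raises : Claim_raises_search_py := by
  unfold Claim_raises_search_py
  exact ⟨fun sig k _ h => by
    rw [Raises_search_py] at h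
    rw [Pre_search_py]
    simp [h], by decide⟩
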